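-- pv_equiv track=rewrite | github.com/danamir1/RevolvingDoors | name_merging_tools.py | merge_entities_sets
-- ===== SOURCE A (Python) =====
-- def merge_entities_sets(merge_pairs):
--     """
--     given pairs of terms that should be merged, generates a dictionary which maps each term to the
--     set of all terms it is merged with.
--     """
--     orgs2merge_sets = {}
--     for org1, org2 in merge_pairs:
--         if (org1 in orgs2merge_sets) and (org2 in orgs2merge_sets):
--             # both orgs are in sets thus the sets should be merged and all 'pointers' should be corrected.
--             orgs2merge_sets[org1].update(orgs2merge_sets[org2])
--             new_set = orgs2merge_sets[org1]
--             for org in orgs2merge_sets[org2]: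
--                 orgs2merge_sets[org] = new_set
--         elif org1 in orgs2merge_sets:
--             orgs2merge_sets[org1].add(org2)
--             orgs2merge_sets[org2] = orgs2merge_sets[org1]
--         elif org2 in orgs2merge_sets:
--             orgs2merge_sets[org2].add(org1)
--             orgs2merge_sets[org1] = orgs2merge_sets[org2]
--         else:
--             new_set = {org1, org2}
--             orgs2merge_sets[org1] = new_set
--             orgs2merge_sets[org2] = new_set
--     return orgs2merge_sets
-- ===== SOURCE B (Python) =====
-- def merge_entities_sets(merge_pairs):
--     """
--     Union-find re-implementation: a parent forest plus one member list per root
--     (kept in merge order), assembled into the answer dictionary at the end.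
--     """
--     parent = {}   # elem -> parent elem; roots satisfy parent[x] == x
--     members = {}  # root -> list of the elements of its component, in merge order
--
--     def find(x):
--         while parent[x] != x:
--             x = parent[x]
--         return x
--
--     for org1, org2 in merge_pairs:
--         if org1 in parent and org2 in parent:
--             r1, r2 = find(org1), find(org2)
--             if r1 != r2:
--                 parent[r2] = r1
--                 members[r1].extend(members.pop(r2))
--         elif org1 in parent:
--             r1 = find(org1)
--             parent[org2] = r1
--             members[r1].append(org2)
--         elif org2 in parent:
--             r2 = find(org2)
--             parent[org1] = r2
--             members[r2].append(org1)
--         else: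
--             parent[org1] = org1
--             members[org1] = [org1]
--             if org2 != org1:
--                 parent[org2] = org1
--                 members[org1].append(org2)
--
--     return {x: set(members[find(x)]) for x in parent}
-- ===== Notes on version B (the rewrite author's own statement) =====
-- stated objective: alternative
-- what changed: Replaces the shared-mutable-set dictionary (which rewrites every member's pointer and copies set contents on each merge) by a union-find parent forest with one member list per root, grouping each key by its root only when the result dictionary is assembled.
import Mathlib
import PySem

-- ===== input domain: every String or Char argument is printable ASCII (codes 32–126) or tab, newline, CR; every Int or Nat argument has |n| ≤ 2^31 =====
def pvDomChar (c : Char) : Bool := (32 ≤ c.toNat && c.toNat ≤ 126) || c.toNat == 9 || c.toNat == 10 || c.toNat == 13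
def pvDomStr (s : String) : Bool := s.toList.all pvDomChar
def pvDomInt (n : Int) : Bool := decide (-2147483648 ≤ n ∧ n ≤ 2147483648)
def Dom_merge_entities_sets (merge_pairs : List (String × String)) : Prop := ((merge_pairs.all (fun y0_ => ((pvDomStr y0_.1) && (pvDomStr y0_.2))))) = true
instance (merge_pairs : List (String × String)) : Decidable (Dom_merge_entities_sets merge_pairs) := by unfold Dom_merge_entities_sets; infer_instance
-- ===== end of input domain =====

-- B replaces A's shared-mutable-set dictionary (pointer rewriting on every merge) by a
-- union-find parent forest with one member list per root (objective: alternative algorithm).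

-- ===== PORT A =====
-- A mutates shared set objects in place; in the port this aliasing is modelled exactly:
-- the keys holding the mutated set object are precisely the members of that set (every
-- key's set contains the key, and all keys of one component share one set object), so an
-- in-place mutation becomes a write of the new set to every member of the old set.
def mergeStepA (d : PySem.Dict String (PySem.Set String)) (pr : String × String) :
    PySem.Dict String (PySem.Set String) :=
  let o1 := pr.1
  let o2 := pr.2
  if d.contains o1 && d.contains o2 then
    let s1 := d.getD o1 []
    let s2 := d.getD o2 []
    let ns := PySem.Set.update s1 s2          -- orgs2merge_sets[org1].update(orgs2merge_sets[org2])
    let d1 := s1.foldl (fun d k => d.insert k ns) d   -- aliasing: every key holding s1 sees the update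
    s2.foldl (fun d k => d.insert k ns) d1    -- for org in orgs2merge_sets[org2]: orgs2merge_sets[org] = new_set
  else if d.contains o1 then
    let s1 := d.getD o1 []
    let ns := PySem.Set.add s1 o2             -- orgs2merge_sets[org1].add(org2)
    let d1 := s1.foldl (fun d k => d.insert k ns) d   -- aliasing: every key holding s1 sees the add
    d1.insert o2 ns                           -- orgs2merge_sets[org2] = orgs2merge_sets[org1]
  else if d.contains o2 then
    let s2 := d.getD o2 []
    let ns := PySem.Set.add s2 o1
    let d1 := s2.foldl (fun d k => d.insert k ns) d
    d1.insert o1 ns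
  else
    let ns := PySem.Set.ofList [o1, o2]       -- new_set = {org1, org2}
    (d.insert o1 ns).insert o2 ns

def merge_entities_sets (merge_pairs : List (String × String)) : List (String × List String) :=
  (merge_pairs.foldl mergeStepA PySem.Dict.empty).items

-- ===== PORT B =====
-- while parent[x] != x: x = parent[x]   (fuel = size of parent: a parent chain is acyclic
-- and visits distinct keys, so it is shorter than the number of keys; the fuel is never hit)
def pvFind (p : PySem.Dict String String) : Nat → String → String
  | 0, x => x
  | f + 1, x =>
    match p.get? x with
    | none => x
    | some y => if y = x then x else pvFind p f y

def mergeStepB (st : PySem.Dict String String × PySem.Dict String (List String))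
    (pr : String × String) :
    PySem.Dict String String × PySem.Dict String (List String) :=
  let p := st.1
  let m := st.2
  let o1 := pr.1
  let o2 := pr.2
  if p.contains o1 && p.contains o2 then
    let r1 := pvFind p p.size o1
    let r2 := pvFind p p.size o2
    if r1 = r2 then (p, m)
    else
      let l2 := m.getD r2 []                  -- members.pop(r2)
      let m1 := m.erase r2
      (p.insert r2 r1, m1.insert r1 (m1.getD r1 [] ++ l2))   -- members[r1].extend(...)
  else if p.contains o1 then
    let r1 := pvFind p p.size o1
    (p.insert o2 r1, m.insert r1 (m.getD r1 [] ++ [o2]))     -- members[r1].append(org2)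
  else if p.contains o2 then
    let r2 := pvFind p p.size o2
    (p.insert o1 r2, m.insert r2 (m.getD r2 [] ++ [o1]))
  else
    let p1 := p.insert o1 o1
    let m1 := m.insert o1 [o1]
    if o2 = o1 then (p1, m1)
    else (p1.insert o2 o1, m1.insert o1 [o1, o2])

def merge_entities_sets_alt (merge_pairs : List (String × String)) : List (String × List String) :=
  let st := merge_pairs.foldl mergeStepB (PySem.Dict.empty, PySem.Dict.empty)
  st.1.keys.map (fun x => (x, PySem.Set.ofList (st.2.getD (pvFind st.1 st.1.size x) [])))

-- ===== PRECONDITION & SPEC =====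
def Spec_merge_entities_sets (merge_pairs : List (String × String)) (out : List (String × List String)) : Prop := out = merge_entities_sets_alt merge_pairs
instance (merge_pairs : List (String × String)) (out : List (String × List String)) : Decidable (Spec_merge_entities_sets merge_pairs out) := by unfold Spec_merge_entities_sets; infer_instance

-- ===== CLAIM (what is proved, stated in full; the proofs are below) =====
def Claim_equal_merge_entities_sets : Prop := ∀ (merge_pairs : List (String × String)), Dom_merge_entities_sets merge_pairs → Spec_merge_entities_sets merge_pairs (merge_entities_sets merge_pairs)

-- ===== LEMMAS AND PROOFS =====

-- The coupling invariant between A's state (one dict, every key ↦ its component's set)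
-- and B's state (parent forest + one member list per root).
def pvInv (d : PySem.Dict String (PySem.Set String)) (p : PySem.Dict String String)
    (m : PySem.Dict String (List String)) : Prop :=
  d.keys = p.keys ∧
  p.keys.Nodup ∧
  (∀ k v, p.get? k = some v → v ∈ p.keys) ∧
  (∀ k, k ∈ p.keys → ∃ r n, p.get? r = some r ∧ pvFind p n k = r ∧
      n < (m.getD r []).length ∧ d.get? k = some (m.getD r []) ∧ k ∈ m.getD r []) ∧
  (∀ r, r ∈ m.keys → p.get? r = some r ∧ (m.getD r []).Nodup ∧
      ∀ x, x ∈ m.getD r [] → x ∈ p.keys ∧ ∃ n', pvFind p n' x = r)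

theorem inv_empty : pvInv PySem.Dict.empty PySem.Dict.empty PySem.Dict.empty := by
  refine ⟨rfl, by simp [PySem.Dict.keys, PySem.Dict.empty], ?_, ?_, ?_⟩ <;>
    simp [PySem.Dict.get?, PySem.Dict.keys, PySem.Dict.empty]

-- ---- pvFind lemmas ----

theorem pvFind_root (p : PySem.Dict String String) (r : String) (hr : p.get? r = some r) :
    ∀ n, pvFind p n r = r
  | 0 => rfl
  | _ + 1 => by simp [pvFind, hr]

theorem pvFind_succ (p : PySem.Dict String String) (n : Nat) (k r : String)
    (h : pvFind p n k = r) (hr : p.get? r = some r) : pvFind p (n + 1) k = r := by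
  induction n generalizing k with
  | zero =>
    simp only [pvFind] at h
    subst h
    exact pvFind_root p k hr 1
  | succ n ih =>
    rcases h0 : p.get? k with _ | y
    · simp only [pvFind, h0] at h ⊢
      exact h
    · by_cases hy : y = k
      · subst hy
        simp only [pvFind, h0] at h ⊢
        exact h
      · simp only [pvFind, h0, if_neg hy] at h ⊢
        exact ih y h

theorem pvFind_le (p : PySem.Dict String String) (n f : Nat) (k r : String)
    (h : pvFind p n k = r) (hr : p.get? r = some r) (hnf : n ≤ f) : pvFind p f k = r := by
  induction f with
  | zero =>
    have : n = 0 := Nat.le_zero.mp hnf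
    subst this; exact h
  | succ f ih =>
    rcases Nat.lt_or_ge n (f + 1) with hlt | hge
    · exact pvFind_succ p f k r (ih (by omega)) hr
    · have : n = f + 1 := by omega
      subst this; exact h

theorem pvFind_unique (p : PySem.Dict String String) (k r r' : String) (n n' : Nat)
    (h : pvFind p n k = r) (hr : p.get? r = some r)
    (h' : pvFind p n' k = r') (hr' : p.get? r' = some r') : r = r' := by
  have h1 := pvFind_le p n (n + n') k r h hr (by omega)
  have h2 := pvFind_le p n' (n + n') k r' h' hr' (by omega)
  rw [h1] at h2; exact h2

theorem pvFind_insert_fresh (p : PySem.Dict String String) (a v : String)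
    (ha : p.get? a = none) (hP : ∀ k w, p.get? k = some w → w ∈ p.keys)
    (n : Nat) (k : String) (hk : k ∈ p.keys) :
    pvFind (p.insert a v) n k = pvFind p n k := by
  induction n generalizing k with
  | zero => rfl
  | succ n ih =>
    have hka : k ≠ a := by
      intro he; subst he
      rw [(PySem.Dict.get?_eq_none_iff_not_mem_keys p k)] at ha
      exact ha hk
    have hg : (p.insert a v).get? k = p.get? k := PySem.Dict.get?_insert_of_ne p v hka
    rcases h0 : p.get? k with _ | y
    · simp only [pvFind, hg, h0]
    · by_cases hy : y = k
      · simp only [pvFind, hg, h0, if_pos hy]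
      · simp only [pvFind, hg, h0, if_neg hy]
        exact ih y (hP k y h0)

theorem pvFind_insert_other (p : PySem.Dict String String) (n : Nat) (k r r2 v : String)
    (h : pvFind p n k = r) (_hr : p.get? r = some r) (hr2 : p.get? r2 = some r2)
    (hne : r ≠ r2) : pvFind (p.insert r2 v) n k = r := by
  induction n generalizing k with
  | zero => exact h
  | succ n ih =>
    by_cases hk2 : k = r2
    · subst hk2
      simp only [pvFind, hr2] at h
      exact absurd h.symm hne
    · have hg : (p.insert r2 v).get? k = p.get? k := PySem.Dict.get?_insert_of_ne p v hk2
      rcases h0 : p.get? k with _ | y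
      · simp only [pvFind, h0] at h
        simp only [pvFind, hg, h0]
        exact h
      · by_cases hy : y = k
        · simp only [pvFind, h0, if_pos hy] at h
          simp only [pvFind, hg, h0, if_pos hy]
          exact h
        · simp only [pvFind, h0, if_neg hy] at h
          simp only [pvFind, hg, h0, if_neg hy]
          exact ih y h

theorem pvFind_union (p : PySem.Dict String String) (n : Nat) (j r1 r2 : String)
    (h : pvFind p n j = r2) (hr2 : p.get? r2 = some r2) (hr1 : p.get? r1 = some r1)
    (hne : r1 ≠ r2) : pvFind (p.insert r2 r1) (n + 1) j = r1 := by
  induction n generalizing j with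
  | zero =>
    simp only [pvFind] at h
    subst h
    simp only [pvFind, PySem.Dict.get?_insert_self, if_neg hne]
  | succ n ih =>
    by_cases hj2 : j = r2
    · rw [hj2]
      have hg : (p.insert r2 r1).get? r2 = some r1 := PySem.Dict.get?_insert_self p r2 r1
      simp only [pvFind, hg, if_neg hne]
      have hg1 : (p.insert r2 r1).get? r1 = some r1 := by
        rw [PySem.Dict.get?_insert_of_ne p r1 hne]; exact hr1
      exact pvFind_root _ r1 hg1 (n + 1)
    · rcases h0 : p.get? j with _ | y
      · simp only [pvFind, h0] at h
        exact absurd h hj2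
      · by_cases hy : y = j
        · simp only [pvFind, h0, if_pos hy] at h
          exact absurd h hj2
        · simp only [pvFind, h0, if_neg hy] at h
          have hg : (p.insert r2 r1).get? j = some y := by
            rw [PySem.Dict.get?_insert_of_ne p r1 hj2]; exact h0
          simp only [pvFind, hg, if_neg hy]
          exact ih y h

-- ---- Dict helper lemmas ----

theorem get?_foldl_insert_const {ν : Type} (l : List String) (ns : ν)
    (d : PySem.Dict String ν) (x : String) :
    (l.foldl (fun d k => d.insert k ns) d).get? x = if x ∈ l then some ns else d.get? x := by
  induction l generalizing d with
  | nil => simp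
  | cons a t ih =>
    simp only [List.foldl_cons, ih, List.mem_cons]
    by_cases hxt : x ∈ t
    · simp [hxt]
    · by_cases hxa : x = a
      · subst hxa
        simp [hxt, PySem.Dict.get?_insert_self]
      · simp [hxt, hxa, PySem.Dict.get?_insert_of_ne d ns hxa]

theorem set_update_of_subset (s : PySem.Set String) (l : List String)
    (h : ∀ x ∈ l, x ∈ s) : PySem.Set.update s l = s := by
  rw [PySem.Set.update_eq_append_filter]
  have : (PySem.Set.ofList l).filter (fun y => !(PySem.Set.contains s y)) = [] := by
    rw [List.filter_eq_nil_iff]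
    intro y hy
    have hmem : y ∈ s := h y ((PySem.Set.mem_ofList l y).mp hy)
    simpa using hmem
  rw [this, List.append_nil]

theorem keys_foldl_insert_const {ν : Type} (l : List String) (ns : ν)
    (d : PySem.Dict String ν) (h : ∀ x ∈ l, x ∈ d.keys) :
    (l.foldl (fun d k => d.insert k ns) d).keys = d.keys := by
  rw [PySem.Dict.keys_foldl_insert]
  exact set_update_of_subset d.keys l h

theorem find?_filter_erase {ν : Type} (k x : String) (t : List (String × ν)) :
    (t.filter (fun p => !(p.1 == k))).find? (fun p => p.1 == x)
      = if x = k then none else t.find? (fun p => p.1 == x) := by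
  induction t with
  | nil => split_ifs <;> simp
  | cons a t ih =>
    by_cases hak : a.1 = k
    · rw [List.filter_cons_of_neg (by simp [hak]), ih]
      by_cases hxk : x = k
      · simp [hxk]
      · rw [if_neg hxk, if_neg hxk,
          List.find?_cons_of_neg (by simp only [hak, beq_iff_eq]; exact fun h => hxk h.symm)]
    · rw [List.filter_cons_of_pos (by simp [hak])]
      by_cases hax : a.1 = x
      · have hxk : ¬ x = k := fun h => hak (hax.trans h)
        rw [List.find?_cons_of_pos (by simp [hax]), if_neg hxk, List.find?_cons_of_pos (by simp [hax])]
      · rw [List.find?_cons_of_neg (by simp [hax]), ih]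
        by_cases hxk : x = k
        · simp [hxk]
        · rw [if_neg hxk, if_neg hxk, List.find?_cons_of_neg (by simp [hax])]

theorem get?_erase {ν : Type} (d : PySem.Dict String ν) (k x : String) :
    (d.erase k).get? x = if x = k then none else d.get? x := by
  obtain ⟨l⟩ := d
  simp only [PySem.Dict.erase, PySem.Dict.get?, find?_filter_erase]
  split_ifs <;> rfl

theorem getD_erase {ν : Type} (d : PySem.Dict String ν) (k x : String) (d0 : ν) :
    (d.erase k).getD x d0 = if x = k then d0 else d.getD x d0 := by
  simp only [PySem.Dict.getD, get?_erase]
  split_ifs <;> rfl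

theorem mem_keys_erase {ν : Type} (d : PySem.Dict String ν) (k x : String) :
    x ∈ (d.erase k).keys ↔ x ∈ d.keys ∧ x ≠ k := by
  obtain ⟨l⟩ := d
  simp only [PySem.Dict.erase, PySem.Dict.keys, List.mem_map, List.mem_filter]
  constructor
  · rintro ⟨p, ⟨hp, hbk⟩, rfl⟩
    refine ⟨⟨p, hp, rfl⟩, ?_⟩
    simpa using hbk
  · rintro ⟨⟨p, hp, rfl⟩, hne⟩
    exact ⟨p, ⟨hp, by simpa using hne⟩, rfl⟩

theorem mem_keys_of_get?_eq_some {ν : Type} (d : PySem.Dict String ν) (k : String) (v : ν)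
    (h : d.get? k = some v) : k ∈ d.keys := by
  by_contra hk
  rw [(PySem.Dict.get?_eq_none_iff_not_mem_keys d k).mpr hk] at h
  cases h

theorem nodup_length_le (l l' : List String) (h : l.Nodup) (hs : l ⊆ l') :
    l.length ≤ l'.length := by
  calc l.length = l.toFinset.card := (List.toFinset_card_of_nodup h).symm
  _ ≤ l'.toFinset.card := Finset.card_le_card (by
      intro x hx
      simp only [List.mem_toFinset] at *
      exact hs hx)
  _ ≤ l'.length := l'.toFinset_card_le

theorem size_eq_keys_length {ν : Type} (d : PySem.Dict String ν) :
    d.size = d.keys.length := by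
  simp [PySem.Dict.size, PySem.Dict.keys]

-- everything pvInv states about a key: its root, the find at full fuel, its component list
theorem comp_facts (d : PySem.Dict String (PySem.Set String)) (p : PySem.Dict String String)
    (m : PySem.Dict String (List String)) (h : pvInv d p m) (k : String) (hk : k ∈ p.keys) :
    ∃ r, p.get? r = some r ∧ pvFind p p.size k = r ∧ d.get? k = some (m.getD r []) ∧
      k ∈ m.getD r [] ∧ r ∈ m.keys ∧ (m.getD r []).Nodup ∧
      (∀ x ∈ m.getD r [], x ∈ p.keys ∧ ∃ n', pvFind p n' x = r) ∧
      ∃ n, pvFind p n k = r ∧ n < (m.getD r []).length ∧ (m.getD r []).length ≤ p.size := by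
  obtain ⟨hK, hN, hP, hC, hM⟩ := h
  obtain ⟨r, n, hr, hf, hlen, hget, hmem⟩ := hC k hk
  have hrm : r ∈ m.keys := by
    by_contra hr0
    have h1 : m.get? r = none := (PySem.Dict.get?_eq_none_iff_not_mem_keys m r).mpr hr0
    have h2 : m.getD r [] = [] := by simp [PySem.Dict.getD, h1]
    rw [h2] at hmem
    cases hmem
  obtain ⟨-, hnd, hall⟩ := hM r hrm
  have hsub : m.getD r [] ⊆ p.keys := fun x hx => (hall x hx).1
  have hlen2 : (m.getD r []).length ≤ p.size := by
    rw [size_eq_keys_length]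
    exact nodup_length_le _ _ hnd hsub
  exact ⟨r, hr, pvFind_le p n p.size k r hf hr (by omega), hget, hmem, hrm, hnd, hall,
    n, hf, hlen, hlen2⟩

theorem inv_step (d : PySem.Dict String (PySem.Set String)) (p : PySem.Dict String String)
    (m : PySem.Dict String (List String)) (pr : String × String) (h : pvInv d p m) :
    pvInv (mergeStepA d pr) (mergeStepB (p, m) pr).1 (mergeStepB (p, m) pr).2 := by
  obtain ⟨o1, o2⟩ := pr
  have hK : d.keys = p.keys := h.1
  have hN : p.keys.Nodup := h.2.1
  have hP : ∀ k v, p.get? k = some v → v ∈ p.keys := h.2.2.1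
  have hcd : ∀ x : String, d.contains x = p.contains x := by
    intro x
    rw [PySem.Dict.contains_eq_decide_mem_keys, PySem.Dict.contains_eq_decide_mem_keys, hK]
  unfold mergeStepA mergeStepB
  dsimp only
  simp only [hcd]
  by_cases h1 : p.contains o1 = true <;> by_cases h2 : p.contains o2 = true <;>
    simp only [h1, h2, Bool.true_and, Bool.false_and, if_false, Bool.and_self, if_pos,
      Bool.false_eq_true]
  · -- both present
    have h1' : o1 ∈ p.keys := (PySem.Dict.contains_iff_mem_keys p o1).mp h1
    have h2' : o2 ∈ p.keys := (PySem.Dict.contains_iff_mem_keys p o2).mp h2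
    obtain ⟨r1, hr1, hfull1, hget1, hmem1, hrm1, hnd1, hall1, n1, hf1, hln1, hsz1⟩ :=
      comp_facts d p m h o1 h1'
    obtain ⟨r2, hr2, hfull2, hget2, hmem2, hrm2, hnd2, hall2, n2, hf2, hln2, hsz2⟩ :=
      comp_facts d p m h o2 h2'
    have hs1 : d.getD o1 [] = m.getD r1 [] := by simp [PySem.Dict.getD, hget1]
    have hs2 : d.getD o2 [] = m.getD r2 [] := by simp [PySem.Dict.getD, hget2]
    rw [hfull1, hfull2, hs1, hs2]
    have hsub1 : ∀ x ∈ m.getD r1 [], x ∈ d.keys := by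
      intro x hx; rw [hK]; exact (hall1 x hx).1
    have hsub2 : ∀ x ∈ m.getD r2 [], x ∈ d.keys := by
      intro x hx; rw [hK]; exact (hall2 x hx).1
    by_cases h12 : r1 = r2
    · -- the two orgs already share one set: every write is a no-op on get?/keys
      rw [if_pos h12]
      dsimp only
      subst h12
      have hupd : PySem.Set.update (m.getD r1 []) (m.getD r1 []) = m.getD r1 [] :=
        set_update_of_subset _ _ (fun x hx => hx)
      rw [hupd]
      have hkeys' : ∀ (d0 : PySem.Dict String (PySem.Set String)),
          (∀ x ∈ m.getD r1 [], x ∈ d0.keys) →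
          ((m.getD r1 []).foldl (fun d k => d.insert k (m.getD r1 [])) d0).keys = d0.keys :=
        fun d0 hs => keys_foldl_insert_const _ _ d0 hs
      have hk1 : ((m.getD r1 []).foldl (fun d k => d.insert k (m.getD r1 [])) d).keys = d.keys :=
        hkeys' d hsub1
      refine ⟨?_, hN, hP, ?_, h.2.2.2.2⟩
      · rw [hkeys' _ (by rw [hk1]; exact hsub1), hk1, hK]
      · intro k hk
        obtain ⟨r, hr, hfullk, hgetk, hmemk, hrmk, hndk, hallk, n, hfn, hlnn, hszk⟩ :=
          comp_facts d p m h k hk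
        refine ⟨r, n, hr, hfn, hlnn, ?_, hmemk⟩
        rw [get?_foldl_insert_const, get?_foldl_insert_const]
        by_cases hk1m : k ∈ m.getD r1 []
        · obtain ⟨-, na, hna⟩ := hall1 k hk1m
          have : r = r1 := pvFind_unique p k r r1 n na hfn hr hna hr1
          rw [if_pos hk1m, this]
        · rw [if_neg hk1m, if_neg hk1m, hgetk]
    · -- two different components: r2's tree is hung under r1, the lists concatenated
      rw [if_neg h12]
      dsimp only
      have hns : PySem.Set.update (m.getD r1 []) (m.getD r2 []) = m.getD r1 [] ++ m.getD r2 [] := by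
        refine PySem.Set.update_eq_append_of_disjoint _ _ hnd2 ?_
        intro x hx2 hx1
        obtain ⟨-, na, hna⟩ := hall1 x hx1
        obtain ⟨-, nb, hnb⟩ := hall2 x hx2
        exact h12 (pvFind_unique p x r1 r2 na nb hna hr1 hnb hr2)
      rw [hns]
      have hL : (m.erase r2).getD r1 [] = m.getD r1 [] := by
        rw [getD_erase, if_neg h12]
      rw [hL]
      have h12' : r2 ≠ r1 := fun he => h12 he.symm
      have hp'get : ∀ z, (p.insert r2 r1).get? z = if z = r2 then some r1 else p.get? z := by
        intro z
        by_cases hz : z = r2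
        · rw [if_pos hz, hz, PySem.Dict.get?_insert_self]
        · rw [if_neg hz, PySem.Dict.get?_insert_of_ne p r1 hz]
      have hp'keys : (p.insert r2 r1).keys = p.keys :=
        PySem.Dict.keys_insert_of_contains p r1
          ((PySem.Dict.contains_iff_mem_keys p r2).mpr (mem_keys_of_get?_eq_some p r2 r2 hr2))
      have hr1' : (p.insert r2 r1).get? r1 = some r1 := by
        rw [hp'get, if_neg h12]; exact hr1
      have hm'getD : ∀ z, ((m.erase r2).insert r1 (m.getD r1 [] ++ m.getD r2 [])).getD z []
          = if z = r1 then m.getD r1 [] ++ m.getD r2 []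
            else if z = r2 then [] else m.getD z [] := by
        intro z
        by_cases hz1 : z = r1
        · rw [if_pos hz1, hz1, PySem.Dict.getD_insert_self]
        · rw [if_neg hz1, PySem.Dict.getD_insert_of_ne _ _ _ hz1, getD_erase]
      have hda : ∀ x, ((m.getD r2 []).foldl
            (fun d k => d.insert k (m.getD r1 [] ++ m.getD r2 []))
            ((m.getD r1 []).foldl (fun d k => d.insert k (m.getD r1 [] ++ m.getD r2 [])) d)).get? x
          = if x ∈ m.getD r2 [] then some (m.getD r1 [] ++ m.getD r2 [])
            else if x ∈ m.getD r1 [] then some (m.getD r1 [] ++ m.getD r2 []) else d.get? x := by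
        intro x
        rw [get?_foldl_insert_const, get?_foldl_insert_const]
      have hdakeys : ((m.getD r2 []).foldl
            (fun d k => d.insert k (m.getD r1 [] ++ m.getD r2 []))
            ((m.getD r1 []).foldl (fun d k => d.insert k (m.getD r1 [] ++ m.getD r2 [])) d)).keys
          = d.keys := by
        rw [keys_foldl_insert_const _ _ _ (by rw [keys_foldl_insert_const _ _ _ hsub1]; exact hsub2),
          keys_foldl_insert_const _ _ _ hsub1]
      have hlen1pos : 0 < (m.getD r1 []).length := List.length_pos_of_mem hmem1
      refine ⟨?_, ?_, ?_, ?_, ?_⟩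
      · rw [hdakeys, hK, hp'keys]
      · rw [hp'keys]; exact hN
      · intro k v hkv
        rw [hp'keys]
        rw [hp'get] at hkv
        by_cases hk2 : k = r2
        · rw [if_pos hk2] at hkv
          cases hkv
          exact mem_keys_of_get?_eq_some p r1 r1 hr1
        · rw [if_neg hk2] at hkv
          exact hP k v hkv
      · intro k hk
        rw [hp'keys] at hk
        obtain ⟨r, hr, hfullk, hgetk, hmemk, hrmk, hndk, hallk, n, hfn, hlnn, hszk⟩ :=
          comp_facts d p m h k hk
        by_cases hk2m : k ∈ m.getD r2 []
        · have hrr2 : r = r2 := by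
            obtain ⟨-, nb, hnb⟩ := hall2 k hk2m
            exact pvFind_unique p k r r2 n nb hfn hr hnb hr2
          subst hrr2
          refine ⟨r1, n + 1, hr1', pvFind_union p n k r1 r hfn hr hr1 h12, ?_, ?_, ?_⟩
          · rw [hm'getD, if_pos rfl, List.length_append]
            omega
          · rw [hda, if_pos hk2m, hm'getD, if_pos rfl]
          · rw [hm'getD, if_pos rfl]
            exact List.mem_append_right _ hk2m
        · by_cases hk1m : k ∈ m.getD r1 []
          · have hrr1 : r = r1 := by
              obtain ⟨-, na, hna⟩ := hall1 k hk1m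
              exact pvFind_unique p k r r1 n na hfn hr hna hr1
            subst hrr1
            refine ⟨r, n, hr1', pvFind_insert_other p n k r r2 r hfn hr hr2 h12, ?_, ?_, ?_⟩
            · rw [hm'getD, if_pos rfl, List.length_append]
              omega
            · rw [hda, if_neg hk2m, if_pos hk1m, hm'getD, if_pos rfl]
            · rw [hm'getD, if_pos rfl]
              exact List.mem_append_left _ hk1m
          · have hrr1 : r ≠ r1 := fun he => hk1m (he ▸ hmemk)
            have hrr2 : r ≠ r2 := fun he => hk2m (he ▸ hmemk)
            refine ⟨r, n, ?_, pvFind_insert_other p n k r r2 r1 hfn hr hr2 hrr2, ?_, ?_, ?_⟩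
            · rw [hp'get, if_neg hrr2]; exact hr
            · rw [hm'getD, if_neg hrr1, if_neg hrr2]; exact hlnn
            · rw [hda, if_neg hk2m, if_neg hk1m, hm'getD, if_neg hrr1, if_neg hrr2]; exact hgetk
            · rw [hm'getD, if_neg hrr1, if_neg hrr2]; exact hmemk
      · intro z hz
        rw [PySem.Dict.mem_keys_insert] at hz
        by_cases hz1 : z = r1
        · subst hz1
          refine ⟨hr1', ?_, ?_⟩
          · rw [hm'getD, if_pos rfl]
            exact List.Nodup.append hnd1 hnd2 (by
              intro a ha1 ha2
              obtain ⟨-, na, hna⟩ := hall1 a ha1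
              obtain ⟨-, nb, hnb⟩ := hall2 a ha2
              exact h12 (pvFind_unique p a z r2 na nb hna hr1 hnb hr2))
          · rw [hm'getD, if_pos rfl]
            intro x hx
            rw [hp'keys]
            rcases List.mem_append.mp hx with hx1 | hx2
            · obtain ⟨hxk, na, hna⟩ := hall1 x hx1
              exact ⟨hxk, na, pvFind_insert_other p na x z r2 z hna hr1 hr2 h12⟩
            · obtain ⟨hxk, nb, hnb⟩ := hall2 x hx2
              exact ⟨hxk, nb + 1, pvFind_union p nb x z r2 hnb hr2 hr1 h12⟩
        · rcases hz with hz | hz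
          · exact absurd hz hz1
          rw [mem_keys_erase] at hz
          obtain ⟨hzm, hz2⟩ := hz
          obtain ⟨hzr, hznd, hzall⟩ := h.2.2.2.2 z hzm
          refine ⟨?_, ?_, ?_⟩
          · rw [hp'get, if_neg hz2]; exact hzr
          · rw [hm'getD, if_neg hz1, if_neg hz2]; exact hznd
          · rw [hm'getD, if_neg hz1, if_neg hz2]
            intro x hx
            obtain ⟨hxk, nx, hnx⟩ := hzall x hx
            rw [hp'keys]
            exact ⟨hxk, nx, pvFind_insert_other p nx x z r2 r1 hnx hzr hr2 hz2⟩
  · -- o1 present, o2 new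
    have h1' : o1 ∈ p.keys := (PySem.Dict.contains_iff_mem_keys p o1).mp h1
    have h2n : o2 ∉ p.keys := fun hm => h2 ((PySem.Dict.contains_iff_mem_keys p o2).mpr hm)
    have h2none : p.get? o2 = none := (PySem.Dict.get?_eq_none_iff_not_mem_keys p o2).mpr h2n
    have h2false : p.contains o2 = false := eq_false_of_ne_true h2
    obtain ⟨r1, hr1, hfull1, hget1, hmem1, hrm1, hnd1, hall1, n1, hf1, hln1, hsz1⟩ :=
      comp_facts d p m h o1 h1'
    rw [hfull1]
    have hs1 : d.getD o1 [] = m.getD r1 [] := by simp [PySem.Dict.getD, hget1]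
    rw [hs1]
    have hsub1 : ∀ x ∈ m.getD r1 [], x ∈ d.keys := by
      intro x hx; rw [hK]; exact (hall1 x hx).1
    have ho2s1 : o2 ∉ m.getD r1 [] := fun hx => h2n (hall1 o2 hx).1
    rw [show PySem.Set.add (m.getD r1 []) o2 = m.getD r1 [] ++ [o2] from
      PySem.Set.add_of_not_mem ho2s1]
    have hr1k : r1 ∈ p.keys := mem_keys_of_get?_eq_some p r1 r1 hr1
    have hr1o2 : r1 ≠ o2 := fun he => h2n (he ▸ hr1k)
    have hp'get : ∀ z, (p.insert o2 r1).get? z = if z = o2 then some r1 else p.get? z := by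
      intro z
      by_cases hz : z = o2
      · rw [if_pos hz, hz, PySem.Dict.get?_insert_self]
      · rw [if_neg hz, PySem.Dict.get?_insert_of_ne p r1 hz]
    have hp'keys : (p.insert o2 r1).keys = p.keys ++ [o2] :=
      PySem.Dict.keys_insert_of_not_contains p r1 h2false
    have hr1' : (p.insert o2 r1).get? r1 = some r1 := by
      rw [hp'get, if_neg hr1o2]; exact hr1
    have hm'getD : ∀ z, (m.insert r1 (m.getD r1 [] ++ [o2])).getD z []
        = if z = r1 then m.getD r1 [] ++ [o2] else m.getD z [] := by
      intro z
      by_cases hz : z = r1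
      · rw [if_pos hz, hz, PySem.Dict.getD_insert_self]
      · rw [if_neg hz, PySem.Dict.getD_insert_of_ne _ _ _ hz]
    have hfkeys : ((m.getD r1 []).foldl
        (fun d k => d.insert k (m.getD r1 [] ++ [o2])) d).keys = d.keys :=
      keys_foldl_insert_const _ _ _ hsub1
    have hda : ∀ x, (((m.getD r1 []).foldl
          (fun d k => d.insert k (m.getD r1 [] ++ [o2])) d).insert o2
          (m.getD r1 [] ++ [o2])).get? x
        = if x = o2 then some (m.getD r1 [] ++ [o2])
          else if x ∈ m.getD r1 [] then some (m.getD r1 [] ++ [o2]) else d.get? x := by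
      intro x
      by_cases hx : x = o2
      · rw [if_pos hx, hx, PySem.Dict.get?_insert_self]
      · rw [if_neg hx, PySem.Dict.get?_insert_of_ne _ _ hx, get?_foldl_insert_const]
    have hdakeys : (((m.getD r1 []).foldl
          (fun d k => d.insert k (m.getD r1 [] ++ [o2])) d).insert o2
          (m.getD r1 [] ++ [o2])).keys = d.keys ++ [o2] := by
      rw [PySem.Dict.keys_insert_of_not_contains _ _ (by
        rw [Bool.eq_false_iff]
        intro hc
        rw [PySem.Dict.contains_iff_mem_keys, hfkeys, hK] at hc
        exact h2n hc), hfkeys]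
    have hfind1 : pvFind (p.insert o2 r1) 1 o2 = r1 := by
      simp only [pvFind, PySem.Dict.get?_insert_self]
      rw [if_neg hr1o2]
    refine ⟨?_, ?_, ?_, ?_, ?_⟩
    · rw [hdakeys, hp'keys, hK]
    · rw [hp'keys]
      exact List.Nodup.append hN (List.nodup_singleton o2)
        (by intro a ha hb; rw [List.mem_singleton] at hb; subst hb; exact h2n ha)
    · intro k v hkv
      rw [hp'keys]
      rw [hp'get] at hkv
      by_cases hk : k = o2
      · rw [if_pos hk] at hkv
        cases hkv
        exact List.mem_append_left _ hr1k
      · rw [if_neg hk] at hkv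
        exact List.mem_append_left _ (hP k v hkv)
    · intro k hk
      rw [hp'keys] at hk
      rcases List.mem_append.mp hk with hk | hk
      · obtain ⟨r, hr, hfullk, hgetk, hmemk, hrmk, hndk, hallk, n, hfn, hlnn, hszk⟩ :=
          comp_facts d p m h k hk
        have hko2 : k ≠ o2 := fun he => h2n (he ▸ hk)
        have hro2 : r ≠ o2 := fun he => h2n (he ▸ mem_keys_of_get?_eq_some p r r hr)
        by_cases hk1m : k ∈ m.getD r1 []
        · have hrr1 : r = r1 := by
            obtain ⟨-, na, hna⟩ := hall1 k hk1m
            exact pvFind_unique p k r r1 n na hfn hr hna hr1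
          subst hrr1
          refine ⟨r, n, hr1', ?_, ?_, ?_, ?_⟩
          · rw [pvFind_insert_fresh p o2 r h2none hP n k hk]; exact hfn
          · rw [hm'getD, if_pos rfl, List.length_append]
            omega
          · rw [hda, if_neg hko2, if_pos hk1m, hm'getD, if_pos rfl]
          · rw [hm'getD, if_pos rfl]
            exact List.mem_append_left _ hk1m
        · have hrr1 : r ≠ r1 := fun he => hk1m (he ▸ hmemk)
          refine ⟨r, n, ?_, ?_, ?_, ?_, ?_⟩
          · rw [hp'get, if_neg hro2]; exact hr
          · rw [pvFind_insert_fresh p o2 r1 h2none hP n k hk]; exact hfn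
          · rw [hm'getD, if_neg hrr1]; exact hlnn
          · rw [hda, if_neg hko2, if_neg hk1m, hm'getD, if_neg hrr1]; exact hgetk
          · rw [hm'getD, if_neg hrr1]; exact hmemk
      · rw [List.mem_singleton] at hk
        subst hk
        refine ⟨r1, 1, hr1', hfind1, ?_, ?_, ?_⟩
        · rw [hm'getD, if_pos rfl, List.length_append, List.length_singleton]
          have := List.length_pos_of_mem hmem1
          omega
        · rw [hda, if_pos rfl, hm'getD, if_pos rfl]
        · rw [hm'getD, if_pos rfl]
          exact List.mem_append_right _ (List.mem_singleton_self _)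
    · intro z hz
      rw [PySem.Dict.mem_keys_insert] at hz
      by_cases hz1 : z = r1
      · subst hz1
        refine ⟨hr1', ?_, ?_⟩
        · rw [hm'getD, if_pos rfl]
          exact List.Nodup.append hnd1 (List.nodup_singleton o2)
            (by intro a ha hb; rw [List.mem_singleton] at hb; subst hb; exact ho2s1 ha)
        · rw [hm'getD, if_pos rfl]
          intro x hx
          rw [hp'keys]
          rcases List.mem_append.mp hx with hx1 | hx2
          · obtain ⟨hxk, na, hna⟩ := hall1 x hx1
            exact ⟨List.mem_append_left _ hxk, na, by
              rw [pvFind_insert_fresh p o2 z h2none hP na x hxk]; exact hna⟩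
          · rw [List.mem_singleton] at hx2
            subst hx2
            exact ⟨List.mem_append_right _ (List.mem_singleton_self _), 1, hfind1⟩
      · rcases hz with hz | hz
        · exact absurd hz hz1
        obtain ⟨hzr, hznd, hzall⟩ := h.2.2.2.2 z hz
        have hzo2 : z ≠ o2 := fun he => h2n (he ▸ mem_keys_of_get?_eq_some p z z hzr)
        refine ⟨?_, ?_, ?_⟩
        · rw [hp'get, if_neg hzo2]; exact hzr
        · rw [hm'getD, if_neg hz1]; exact hznd
        · rw [hm'getD, if_neg hz1]
          intro x hx
          obtain ⟨hxk, nx, hnx⟩ := hzall x hx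
          rw [hp'keys]
          exact ⟨List.mem_append_left _ hxk, nx, by
            rw [pvFind_insert_fresh p o2 r1 h2none hP nx x hxk]; exact hnx⟩
  · -- o1 present, o2 new (mirror of the previous branch)
    have h2' : o2 ∈ p.keys := (PySem.Dict.contains_iff_mem_keys p o2).mp h2
    have h2n : o1 ∉ p.keys := fun hm => h1 ((PySem.Dict.contains_iff_mem_keys p o1).mpr hm)
    have h2none : p.get? o1 = none := (PySem.Dict.get?_eq_none_iff_not_mem_keys p o1).mpr h2n
    have h2false : p.contains o1 = false := eq_false_of_ne_true h1
    obtain ⟨r1, hr1, hfull1, hget1, hmem1, hrm1, hnd1, hall1, n1, hf1, hln1, hsz1⟩ :=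
      comp_facts d p m h o2 h2'
    rw [hfull1]
    have hs1 : d.getD o2 [] = m.getD r1 [] := by simp [PySem.Dict.getD, hget1]
    rw [hs1]
    have hsub1 : ∀ x ∈ m.getD r1 [], x ∈ d.keys := by
      intro x hx; rw [hK]; exact (hall1 x hx).1
    have ho2s1 : o1 ∉ m.getD r1 [] := fun hx => h2n (hall1 o1 hx).1
    rw [show PySem.Set.add (m.getD r1 []) o1 = m.getD r1 [] ++ [o1] from
      PySem.Set.add_of_not_mem ho2s1]
    have hr1k : r1 ∈ p.keys := mem_keys_of_get?_eq_some p r1 r1 hr1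
    have hr1o2 : r1 ≠ o1 := fun he => h2n (he ▸ hr1k)
    have hp'get : ∀ z, (p.insert o1 r1).get? z = if z = o1 then some r1 else p.get? z := by
      intro z
      by_cases hz : z = o1
      · rw [if_pos hz, hz, PySem.Dict.get?_insert_self]
      · rw [if_neg hz, PySem.Dict.get?_insert_of_ne p r1 hz]
    have hp'keys : (p.insert o1 r1).keys = p.keys ++ [o1] :=
      PySem.Dict.keys_insert_of_not_contains p r1 h2false
    have hr1' : (p.insert o1 r1).get? r1 = some r1 := by
      rw [hp'get, if_neg hr1o2]; exact hr1
    have hm'getD : ∀ z, (m.insert r1 (m.getD r1 [] ++ [o1])).getD z []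
        = if z = r1 then m.getD r1 [] ++ [o1] else m.getD z [] := by
      intro z
      by_cases hz : z = r1
      · rw [if_pos hz, hz, PySem.Dict.getD_insert_self]
      · rw [if_neg hz, PySem.Dict.getD_insert_of_ne _ _ _ hz]
    have hfkeys : ((m.getD r1 []).foldl
        (fun d k => d.insert k (m.getD r1 [] ++ [o1])) d).keys = d.keys :=
      keys_foldl_insert_const _ _ _ hsub1
    have hda : ∀ x, (((m.getD r1 []).foldl
          (fun d k => d.insert k (m.getD r1 [] ++ [o1])) d).insert o1
          (m.getD r1 [] ++ [o1])).get? x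
        = if x = o1 then some (m.getD r1 [] ++ [o1])
          else if x ∈ m.getD r1 [] then some (m.getD r1 [] ++ [o1]) else d.get? x := by
      intro x
      by_cases hx : x = o1
      · rw [if_pos hx, hx, PySem.Dict.get?_insert_self]
      · rw [if_neg hx, PySem.Dict.get?_insert_of_ne _ _ hx, get?_foldl_insert_const]
    have hdakeys : (((m.getD r1 []).foldl
          (fun d k => d.insert k (m.getD r1 [] ++ [o1])) d).insert o1
          (m.getD r1 [] ++ [o1])).keys = d.keys ++ [o1] := by
      rw [PySem.Dict.keys_insert_of_not_contains _ _ (by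
        rw [Bool.eq_false_iff]
        intro hc
        rw [PySem.Dict.contains_iff_mem_keys, hfkeys, hK] at hc
        exact h2n hc), hfkeys]
    have hfind1 : pvFind (p.insert o1 r1) 1 o1 = r1 := by
      simp only [pvFind, PySem.Dict.get?_insert_self]
      rw [if_neg hr1o2]
    refine ⟨?_, ?_, ?_, ?_, ?_⟩
    · rw [hdakeys, hp'keys, hK]
    · rw [hp'keys]
      exact List.Nodup.append hN (List.nodup_singleton o1)
        (by intro a ha hb; rw [List.mem_singleton] at hb; subst hb; exact h2n ha)
    · intro k v hkv
      rw [hp'keys]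
      rw [hp'get] at hkv
      by_cases hk : k = o1
      · rw [if_pos hk] at hkv
        cases hkv
        exact List.mem_append_left _ hr1k
      · rw [if_neg hk] at hkv
        exact List.mem_append_left _ (hP k v hkv)
    · intro k hk
      rw [hp'keys] at hk
      rcases List.mem_append.mp hk with hk | hk
      · obtain ⟨r, hr, hfullk, hgetk, hmemk, hrmk, hndk, hallk, n, hfn, hlnn, hszk⟩ :=
          comp_facts d p m h k hk
        have hko2 : k ≠ o1 := fun he => h2n (he ▸ hk)
        have hro2 : r ≠ o1 := fun he => h2n (he ▸ mem_keys_of_get?_eq_some p r r hr)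
        by_cases hk1m : k ∈ m.getD r1 []
        · have hrr1 : r = r1 := by
            obtain ⟨-, na, hna⟩ := hall1 k hk1m
            exact pvFind_unique p k r r1 n na hfn hr hna hr1
          subst hrr1
          refine ⟨r, n, hr1', ?_, ?_, ?_, ?_⟩
          · rw [pvFind_insert_fresh p o1 r h2none hP n k hk]; exact hfn
          · rw [hm'getD, if_pos rfl, List.length_append]
            omega
          · rw [hda, if_neg hko2, if_pos hk1m, hm'getD, if_pos rfl]
          · rw [hm'getD, if_pos rfl]
            exact List.mem_append_left _ hk1m
        · have hrr1 : r ≠ r1 := fun he => hk1m (he ▸ hmemk)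
          refine ⟨r, n, ?_, ?_, ?_, ?_, ?_⟩
          · rw [hp'get, if_neg hro2]; exact hr
          · rw [pvFind_insert_fresh p o1 r1 h2none hP n k hk]; exact hfn
          · rw [hm'getD, if_neg hrr1]; exact hlnn
          · rw [hda, if_neg hko2, if_neg hk1m, hm'getD, if_neg hrr1]; exact hgetk
          · rw [hm'getD, if_neg hrr1]; exact hmemk
      · rw [List.mem_singleton] at hk
        subst hk
        refine ⟨r1, 1, hr1', hfind1, ?_, ?_, ?_⟩
        · rw [hm'getD, if_pos rfl, List.length_append, List.length_singleton]
          have := List.length_pos_of_mem hmem1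
          omega
        · rw [hda, if_pos rfl, hm'getD, if_pos rfl]
        · rw [hm'getD, if_pos rfl]
          exact List.mem_append_right _ (List.mem_singleton_self _)
    · intro z hz
      rw [PySem.Dict.mem_keys_insert] at hz
      by_cases hz1 : z = r1
      · subst hz1
        refine ⟨hr1', ?_, ?_⟩
        · rw [hm'getD, if_pos rfl]
          exact List.Nodup.append hnd1 (List.nodup_singleton o1)
            (by intro a ha hb; rw [List.mem_singleton] at hb; subst hb; exact ho2s1 ha)
        · rw [hm'getD, if_pos rfl]
          intro x hx
          rw [hp'keys]
          rcases List.mem_append.mp hx with hx1 | hx2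
          · obtain ⟨hxk, na, hna⟩ := hall1 x hx1
            exact ⟨List.mem_append_left _ hxk, na, by
              rw [pvFind_insert_fresh p o1 z h2none hP na x hxk]; exact hna⟩
          · rw [List.mem_singleton] at hx2
            subst hx2
            exact ⟨List.mem_append_right _ (List.mem_singleton_self _), 1, hfind1⟩
      · rcases hz with hz | hz
        · exact absurd hz hz1
        obtain ⟨hzr, hznd, hzall⟩ := h.2.2.2.2 z hz
        have hzo2 : z ≠ o1 := fun he => h2n (he ▸ mem_keys_of_get?_eq_some p z z hzr)
        refine ⟨?_, ?_, ?_⟩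
        · rw [hp'get, if_neg hzo2]; exact hzr
        · rw [hm'getD, if_neg hz1]; exact hznd
        · rw [hm'getD, if_neg hz1]
          intro x hx
          obtain ⟨hxk, nx, hnx⟩ := hzall x hx
          rw [hp'keys]
          exact ⟨List.mem_append_left _ hxk, nx, by
            rw [pvFind_insert_fresh p o1 r1 h2none hP nx x hxk]; exact hnx⟩
  · -- both new
    have h1n : o1 ∉ p.keys := fun hm => h1 ((PySem.Dict.contains_iff_mem_keys p o1).mpr hm)
    have h2n : o2 ∉ p.keys := fun hm => h2 ((PySem.Dict.contains_iff_mem_keys p o2).mpr hm)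
    have h1none : p.get? o1 = none := (PySem.Dict.get?_eq_none_iff_not_mem_keys p o1).mpr h1n
    have h2none : p.get? o2 = none := (PySem.Dict.get?_eq_none_iff_not_mem_keys p o2).mpr h2n
    have h1false : p.contains o1 = false := eq_false_of_ne_true h1
    have hd1false : d.contains o1 = false := by rw [hcd]; exact h1false
    by_cases ho : o2 = o1
    · rw [if_pos ho]
      dsimp only
      rw [ho]
      have hof : PySem.Set.ofList [o1, o1] = [o1] := by
        have h1e : PySem.Set.ofList [o1] = [o1] :=
          PySem.Set.ofList_eq_self_of_nodup _ (List.nodup_singleton o1)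
        calc PySem.Set.ofList ([o1] ++ [o1]) = PySem.Set.add (PySem.Set.ofList [o1]) o1 :=
              PySem.Set.ofList_append_singleton _ _
          _ = [o1] := by rw [h1e, PySem.Set.add_of_mem (List.mem_singleton_self o1)]
      rw [hof, PySem.Dict.insert_insert_self]
      have hp'keys : (p.insert o1 o1).keys = p.keys ++ [o1] :=
        PySem.Dict.keys_insert_of_not_contains p o1 h1false
      have hp'get : ∀ z, (p.insert o1 o1).get? z = if z = o1 then some o1 else p.get? z :=
        fun z => PySem.Dict.get?_insert p o1 z o1
      have hm'getD : ∀ z, (m.insert o1 [o1]).getD z [] = if z = o1 then [o1] else m.getD z [] := by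
        intro z
        by_cases hz : z = o1
        · rw [if_pos hz, hz, PySem.Dict.getD_insert_self]
        · rw [if_neg hz, PySem.Dict.getD_insert_of_ne _ _ _ hz]
      have hda : ∀ x, (d.insert o1 [o1]).get? x = if x = o1 then some [o1] else d.get? x :=
        fun x => PySem.Dict.get?_insert d o1 x [o1]
      have ho2root : (p.insert o1 o1).get? o1 = some o1 := PySem.Dict.get?_insert_self p o1 o1
      refine ⟨?_, ?_, ?_, ?_, ?_⟩
      · rw [PySem.Dict.keys_insert_of_not_contains d _ hd1false, hp'keys, hK]
      · rw [hp'keys]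
        exact List.Nodup.append hN (List.nodup_singleton o1)
          (by intro a ha hb; rw [List.mem_singleton] at hb; subst hb; exact h1n ha)
      · intro k v hkv
        rw [hp'keys]
        rw [hp'get] at hkv
        by_cases hk : k = o1
        · rw [if_pos hk] at hkv
          cases hkv
          exact List.mem_append_right _ (List.mem_singleton_self _)
        · rw [if_neg hk] at hkv
          exact List.mem_append_left _ (hP k v hkv)
      · intro k hk
        rw [hp'keys] at hk
        rcases List.mem_append.mp hk with hk | hk
        · obtain ⟨r, hr, hfullk, hgetk, hmemk, hrmk, hndk, hallk, n, hfn, hlnn, hszk⟩ :=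
            comp_facts d p m h k hk
          have hko2 : k ≠ o1 := fun he => h1n (he ▸ hk)
          have hro2 : r ≠ o1 := fun he => h1n (he ▸ mem_keys_of_get?_eq_some p r r hr)
          refine ⟨r, n, ?_, ?_, ?_, ?_, ?_⟩
          · rw [hp'get, if_neg hro2]; exact hr
          · rw [pvFind_insert_fresh p o1 o1 h1none hP n k hk]; exact hfn
          · rw [hm'getD, if_neg hro2]; exact hlnn
          · rw [hda, if_neg hko2, hm'getD, if_neg hro2]; exact hgetk
          · rw [hm'getD, if_neg hro2]; exact hmemk
        · rw [List.mem_singleton] at hk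
          rw [hk]
          refine ⟨o1, 0, ho2root, rfl, ?_, ?_, ?_⟩
          · rw [hm'getD, if_pos rfl]
            simp
          · rw [hda, if_pos rfl, hm'getD, if_pos rfl]
          · rw [hm'getD, if_pos rfl]
            exact List.mem_singleton_self _
      · intro z hz
        rw [PySem.Dict.mem_keys_insert] at hz
        by_cases hz1 : z = o1
        · subst hz1
          refine ⟨ho2root, ?_, ?_⟩
          · rw [hm'getD, if_pos rfl]
            exact List.nodup_singleton _
          · rw [hm'getD, if_pos rfl]
            intro x hx
            rw [List.mem_singleton] at hx
            subst hx
            rw [hp'keys]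
            exact ⟨List.mem_append_right _ (List.mem_singleton_self _), 0, rfl⟩
        · rcases hz with hz | hz
          · exact absurd hz hz1
          obtain ⟨hzr, hznd, hzall⟩ := h.2.2.2.2 z hz
          have hzo2 : z ≠ o1 := fun he => h1n (he ▸ mem_keys_of_get?_eq_some p z z hzr)
          refine ⟨?_, ?_, ?_⟩
          · rw [hp'get, if_neg hzo2]; exact hzr
          · rw [hm'getD, if_neg hzo2]; exact hznd
          · rw [hm'getD, if_neg hzo2]
            intro x hx
            obtain ⟨hxk, nx, hnx⟩ := hzall x hx
            rw [hp'keys]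
            exact ⟨List.mem_append_left _ hxk, nx, by
              rw [pvFind_insert_fresh p o1 o1 h1none hP nx x hxk]; exact hnx⟩
    · rw [if_neg ho]
      dsimp only
      have ho' : o1 ≠ o2 := fun he => ho he.symm
      have hof : PySem.Set.ofList [o1, o2] = [o1, o2] :=
        PySem.Set.ofList_eq_self_of_nodup _ (by simp [ho'])
      rw [hof, PySem.Dict.insert_insert_self]
      have hqkeys : (p.insert o1 o1).keys = p.keys ++ [o1] :=
        PySem.Dict.keys_insert_of_not_contains p o1 h1false
      have hqget : ∀ z, (p.insert o1 o1).get? z = if z = o1 then some o1 else p.get? z :=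
        fun z => PySem.Dict.get?_insert p o1 z o1
      have hqo2 : (p.insert o1 o1).get? o2 = none := by
        rw [hqget, if_neg (fun he => ho he)]; exact h2none
      have hPq : ∀ k v, (p.insert o1 o1).get? k = some v → v ∈ (p.insert o1 o1).keys := by
        intro k v hkv
        rw [hqget] at hkv
        rw [hqkeys]
        by_cases hk : k = o1
        · rw [if_pos hk] at hkv
          cases hkv
          exact List.mem_append_right _ (List.mem_singleton_self _)
        · rw [if_neg hk] at hkv
          exact List.mem_append_left _ (hP k v hkv)
      have hp'keys : ((p.insert o1 o1).insert o2 o1).keys = p.keys ++ [o1] ++ [o2] := by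
        rw [PySem.Dict.keys_insert_of_not_contains _ _ (by
          rw [Bool.eq_false_iff]
          intro hc
          rw [PySem.Dict.contains_iff_mem_keys, hqkeys] at hc
          rcases List.mem_append.mp hc with hc | hc
          · exact h2n hc
          · rw [List.mem_singleton] at hc
            exact ho hc), hqkeys]
      have hp'get : ∀ z, ((p.insert o1 o1).insert o2 o1).get? z
          = if z = o2 then some o1 else if z = o1 then some o1 else p.get? z := by
        intro z
        rw [PySem.Dict.get?_insert, hqget]
      have ho1root : ((p.insert o1 o1).insert o2 o1).get? o1 = some o1 := by
        rw [hp'get, if_neg ho', if_pos rfl]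
      have hfind1 : pvFind ((p.insert o1 o1).insert o2 o1) 1 o2 = o1 := by
        simp only [pvFind, PySem.Dict.get?_insert_self]
        rw [if_neg ho']
      have hfresh : ∀ n k, k ∈ p.keys → pvFind ((p.insert o1 o1).insert o2 o1) n k = pvFind p n k := by
        intro n k hk
        rw [pvFind_insert_fresh (p.insert o1 o1) o2 o1 hqo2 hPq n k
            (by rw [hqkeys]; exact List.mem_append_left _ hk),
          pvFind_insert_fresh p o1 o1 h1none hP n k hk]
      have hda : ∀ x, ((d.insert o1 [o1, o2]).insert o2 [o1, o2]).get? x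
          = if x = o2 then some [o1, o2] else if x = o1 then some [o1, o2] else d.get? x := by
        intro x
        rw [PySem.Dict.get?_insert, PySem.Dict.get?_insert]
      have hdakeys : ((d.insert o1 [o1, o2]).insert o2 [o1, o2]).keys = d.keys ++ [o1] ++ [o2] := by
        rw [PySem.Dict.keys_insert_of_not_contains _ _ (by
          rw [Bool.eq_false_iff]
          intro hc
          rw [PySem.Dict.contains_iff_mem_keys, PySem.Dict.keys_insert_of_not_contains d _ hd1false,
            hK] at hc
          rcases List.mem_append.mp hc with hc | hc
          · exact h2n hc
          · rw [List.mem_singleton] at hc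
            exact ho hc), PySem.Dict.keys_insert_of_not_contains d _ hd1false]
      have hm'getD : ∀ z, (m.insert o1 [o1, o2]).getD z []
          = if z = o1 then [o1, o2] else m.getD z [] := by
        intro z
        by_cases hz : z = o1
        · rw [if_pos hz, hz, PySem.Dict.getD_insert_self]
        · rw [if_neg hz, PySem.Dict.getD_insert_of_ne _ _ _ hz]
      refine ⟨?_, ?_, ?_, ?_, ?_⟩
      · rw [hdakeys, hp'keys, hK]
      · rw [hp'keys]
        refine List.Nodup.append (List.Nodup.append hN (List.nodup_singleton o1)
          (by intro a ha hb; rw [List.mem_singleton] at hb; subst hb; exact h1n ha))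
          (List.nodup_singleton o2) ?_
        intro a ha hb
        rw [List.mem_singleton] at hb
        subst hb
        rcases List.mem_append.mp ha with ha | ha
        · exact h2n ha
        · rw [List.mem_singleton] at ha
          exact ho' ha.symm
      · intro k v hkv
        rw [hp'keys]
        rw [hp'get] at hkv
        by_cases hk2 : k = o2
        · rw [if_pos hk2] at hkv
          cases hkv
          exact List.mem_append_left _ (List.mem_append_right _ (List.mem_singleton_self _))
        · rw [if_neg hk2] at hkv
          by_cases hk1 : k = o1
          · rw [if_pos hk1] at hkv
            cases hkv
            exact List.mem_append_left _ (List.mem_append_right _ (List.mem_singleton_self _))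
          · rw [if_neg hk1] at hkv
            exact List.mem_append_left _ (List.mem_append_left _ (hP k v hkv))
      · intro k hk
        rw [hp'keys] at hk
        rcases List.mem_append.mp hk with hk | hk
        swap
        · rw [List.mem_singleton] at hk
          rw [hk]
          refine ⟨o1, 1, ho1root, hfind1, ?_, ?_, ?_⟩
          · rw [hm'getD, if_pos rfl]
            simp
          · rw [hda, if_pos rfl, hm'getD, if_pos rfl]
          · rw [hm'getD, if_pos rfl]
            simp
        rcases List.mem_append.mp hk with hk | hk
        swap
        · rw [List.mem_singleton] at hk
          rw [hk]
          refine ⟨o1, 0, ho1root, rfl, ?_, ?_, ?_⟩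
          · rw [hm'getD, if_pos rfl]
            simp
          · rw [hda, if_neg ho', if_pos rfl, hm'getD, if_pos rfl]
          · rw [hm'getD, if_pos rfl]
            simp
        · obtain ⟨r, hr, hfullk, hgetk, hmemk, hrmk, hndk, hallk, n, hfn, hlnn, hszk⟩ :=
            comp_facts d p m h k hk
          have hko1 : k ≠ o1 := fun he => h1n (he ▸ hk)
          have hko2 : k ≠ o2 := fun he => h2n (he ▸ hk)
          have hrk : r ∈ p.keys := mem_keys_of_get?_eq_some p r r hr
          have hro1 : r ≠ o1 := fun he => h1n (he ▸ hrk)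
          have hro2 : r ≠ o2 := fun he => h2n (he ▸ hrk)
          refine ⟨r, n, ?_, ?_, ?_, ?_, ?_⟩
          · rw [hp'get, if_neg hro2, if_neg hro1]; exact hr
          · rw [hfresh]; exact hfn; exact hk
          · rw [hm'getD, if_neg hro1]; exact hlnn
          · rw [hda, if_neg hko2, if_neg hko1, hm'getD, if_neg hro1]; exact hgetk
          · rw [hm'getD, if_neg hro1]; exact hmemk
      · intro z hz
        rw [PySem.Dict.mem_keys_insert] at hz
        by_cases hz1 : z = o1
        · subst hz1
          refine ⟨ho1root, ?_, ?_⟩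
          · rw [hm'getD, if_pos rfl]
            simp [ho']
          · rw [hm'getD, if_pos rfl]
            intro x hx
            rw [hp'keys]
            rcases List.mem_cons.mp hx with hx | hx
            · subst hx
              exact ⟨List.mem_append_left _ (List.mem_append_right _ (List.mem_singleton_self _)),
                0, rfl⟩
            · rw [List.mem_singleton] at hx
              subst hx
              exact ⟨List.mem_append_right _ (List.mem_singleton_self _), 1, hfind1⟩
        · rcases hz with hz | hz
          · exact absurd hz hz1
          obtain ⟨hzr, hznd, hzall⟩ := h.2.2.2.2 z hz
          have hzk : z ∈ p.keys := mem_keys_of_get?_eq_some p z z hzr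
          have hzo2 : z ≠ o2 := fun he => h2n (he ▸ hzk)
          refine ⟨?_, ?_, ?_⟩
          · rw [hp'get, if_neg hzo2, if_neg hz1]; exact hzr
          · rw [hm'getD, if_neg hz1]; exact hznd
          · rw [hm'getD, if_neg hz1]
            intro x hx
            obtain ⟨hxk, nx, hnx⟩ := hzall x hx
            rw [hp'keys]
            refine ⟨List.mem_append_left _ (List.mem_append_left _ hxk), nx, ?_⟩
            rw [hfresh]
            exact hnx
            exact hxk

theorem inv_final (d : PySem.Dict String (PySem.Set String)) (p : PySem.Dict String String)
    (m : PySem.Dict String (List String)) (h : pvInv d p m) :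
    d.items = p.keys.map (fun x => (x, PySem.Set.ofList (m.getD (pvFind p p.size x) []))) := by
  have hK : d.keys = p.keys := h.1
  have hdnd : d.keys.Nodup := hK ▸ h.2.1
  rw [PySem.Dict.items_eq_map_keys d hdnd [], hK]
  apply List.map_congr_left
  intro x hx
  obtain ⟨r, hr, hfull, hget, hmem, hrm, hnd, hall, -⟩ := comp_facts d p m h x hx
  have hD : d.getD x [] = m.getD r [] := by simp [PySem.Dict.getD, hget]
  rw [hD, hfull, PySem.Set.ofList_eq_self_of_nodup _ hnd]

-- ===== VERDICT (by name: the statement is the Claim_ definition above) =====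
theorem merge_entities_sets_spec : Claim_equal_merge_entities_sets := by
  intro mp hdom
  clear hdom
  unfold Spec_merge_entities_sets merge_entities_sets merge_entities_sets_alt
  have h : ∀ (d : PySem.Dict String (PySem.Set String)) (p : PySem.Dict String String)
      (m : PySem.Dict String (List String)), pvInv d p m →
      pvInv (mp.foldl mergeStepA d) (mp.foldl mergeStepB (p, m)).1 (mp.foldl mergeStepB (p, m)).2 := by
    induction mp with
    | nil => intro d p m h; exact h
    | cons a t ih =>
      intro d p m h
      have h2 := ih (mergeStepA d a) (mergeStepB (p, m) a).1 (mergeStepB (p, m) a).2 (inv_step d p m a h)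
      simpa using h2
  exact inv_final _ _ _ (h _ _ _ inv_empty)
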